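-- pv_equiv track=rewrite | github.com/igortsk123/WFM-admin | wfm-develop mobile 07.05.2026/wfm/mobile/figma_color_generator/scripts/generate_semantic_colors.py | semantic_path_to_field_name
-- ===== SOURCE A (Python) =====
-- def semantic_path_to_field_name(path: str) -> str:
--     """
--     Конвертация пути в имя поля
--     Примеры:
--         card/text/primary → cardTextPrimary
--         button/primary/bg/default → buttonPrimaryBgDefault
--         text/primary → textPrimary
--         segmented control/bg → segmentedControlBg
--         overlay-modal → surfaceOverlayModal (специальный случай)
--     """
--     # Специальный случай для overlay-modal
--     if path == 'overlay-modal':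
--         return 'surfaceOverlayModal'
--
--     # Разбиваем по /
--     parts = path.split('/')
--
--     # Убираем пустые части
--     parts = [p for p in parts if p]
--
--     if not parts:
--         return ''
--
--     # Обрабатываем каждую часть
--     processed_parts = []
--     for i, part in enumerate(parts):
--         # Заменяем пробелы и дефисы на разделители
--         part = part.replace(' ', '-')
--
--         if i == 0:
--             # Первая часть - конвертируем в camelCase с маленькой буквы
--             subparts = part.split('-')
--             result = subparts[0].lower()
--             for subpart in subparts[1:]:
--                 result += subpart.capitalize()
--             processed_parts.append(result)
--         else:
--             # Остальные части - конвертируем в PascalCase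
--             subparts = part.split('-')
--             for subpart in subparts:
--                 processed_parts.append(subpart.capitalize())
--
--     return ''.join(processed_parts)
-- ===== SOURCE B (Python) =====
-- def semantic_path_to_field_name(path: str) -> str:
--     """Single character-level pass: a 3-state machine (first-token-lower /
--     capitalize-next / lower-rest) instead of split-based tokenization."""
--     if path == 'overlay-modal':
--         return 'surfaceOverlayModal'
--     out = []
--     mode = 0        # 0: in first token (lowercase), 1: capitalize next char, 2: lowercase rest
--     seen = False    # current '/'-part has at least one character
--     for c in path:
--         if c == '/':
--             if seen:
--                 mode = 1
--                 seen = False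
--         elif c == '-' or c == ' ':
--             seen = True
--             mode = 1
--         else:
--             seen = True
--             if mode == 1:
--                 out.append(c.upper())
--                 mode = 2
--             else:
--                 out.append(c.lower())
--     return ''.join(out)
-- ===== Notes on version B (the rewrite author's own statement) =====
-- stated objective: alternative
-- what changed: Replaces A's two-level tokenization (split on '/', filter empties, replace spaces, split each part on '-', then an indexed loop with an i==0 branch) by a single character-level pass over the string driven by a 3-state machine (first-token-lower / capitalize-next / lower-rest) with a seen-a-part-character flag; no intermediate lists of parts or tokens are built.
import Mathlib
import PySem

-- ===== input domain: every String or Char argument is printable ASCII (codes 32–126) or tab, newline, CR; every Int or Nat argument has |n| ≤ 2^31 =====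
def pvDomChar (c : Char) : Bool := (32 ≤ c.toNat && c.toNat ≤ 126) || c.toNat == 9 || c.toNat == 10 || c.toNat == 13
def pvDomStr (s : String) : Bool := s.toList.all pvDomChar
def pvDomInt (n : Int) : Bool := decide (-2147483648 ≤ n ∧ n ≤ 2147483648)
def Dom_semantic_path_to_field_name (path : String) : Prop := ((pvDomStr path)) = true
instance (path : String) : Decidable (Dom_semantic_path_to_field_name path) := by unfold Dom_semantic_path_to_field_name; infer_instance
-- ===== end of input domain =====

-- B replaces A's split/replace/split tokenization by a single character-level pass with a
-- 3-state machine (alternative decomposition; same cost).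

-- Python's str.capitalize (exact on ASCII: first char uppercased, rest lowercased); used by A.
def pvCap (cs : List Char) : List Char :=
  match cs with
  | [] => []
  | c :: r => PySem.Chars.upperChar c :: PySem.Chars.lower r

-- ===== PORT A =====
-- the 'for i, part in enumerate(parts)' loop, index carried explicitly
def pvA_loop : List (List Char) → Nat → List (List Char) → List (List Char)
  | [], _, acc => acc
  | p :: ps, i, acc =>
      let part := PySem.Chars.replace p [' '] ['-']
      let subs := PySem.Chars.splitOn part ['-']
      if i = 0 then
        pvA_loop ps (i + 1)
          (acc ++ [(subs.drop 1).foldl (fun r sp => r ++ pvCap sp) (PySem.Chars.lower (subs.headD []))])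
      else
        pvA_loop ps (i + 1) (acc ++ subs.map pvCap)

def semantic_path_to_field_name (path : String) : String :=
  if path == "overlay-modal" then "surfaceOverlayModal"
  else
    let parts := (PySem.Chars.splitOn path.toList ['/']).filter (fun p => p != [])
    if parts = [] then ""
    else String.ofList (PySem.Chars.join [] (pvA_loop parts 0 []))

-- ===== PORT B =====
-- one step of Source B's loop body; state = (out, mode, seen)
def pvB_step (st : List Char × Nat × Bool) (c : Char) : List Char × Nat × Bool :=
  let (out, mode, seen) := st
  if c = '/' then
    if seen then (out, 1, false) else (out, mode, seen)
  else if c = '-' ∨ c = ' ' then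
    (out, 1, true)
  else if mode = 1 then
    (out ++ [PySem.Chars.upperChar c], 2, true)
  else
    (out ++ [PySem.Chars.lowerChar c], mode, true)

def semantic_path_to_field_name_alt (path : String) : String :=
  if path == "overlay-modal" then "surfaceOverlayModal"
  else
    String.ofList (path.toList.foldl pvB_step ([], 0, false)).1

-- ===== PRECONDITION & SPEC =====
def Spec_semantic_path_to_field_name (path : String) (out : String) : Prop := out = semantic_path_to_field_name_alt path
instance (path : String) (out : String) : Decidable (Spec_semantic_path_to_field_name path out) := by unfold Spec_semantic_path_to_field_name; infer_instance

-- ===== CLAIM (what is proved, stated in full; the proofs are below) =====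
def Claim_equal_semantic_path_to_field_name : Prop := ∀ (path : String), Dom_semantic_path_to_field_name path → Spec_semantic_path_to_field_name path (semantic_path_to_field_name path)

-- ===== LEMMAS AND PROOFS =====

-- simple structural split on one separator character
def pvSplit (d : Char) : List Char → List (List Char)
  | [] => [[]]
  | c :: r =>
      if c = d then [] :: pvSplit d r
      else (c :: (pvSplit d r).headD []) :: (pvSplit d r).tail

-- ' ' → '-' as a character map
def pvRep (c : Char) : Char := if c = ' ' then '-' else c

-- B's machine as a structural recursion (proof mirror of the foldl)
def pvRecGo (m : Nat) (s : Bool) : List Char → List Char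
  | [] => []
  | c :: r =>
      if c = '/' then
        if s then pvRecGo 1 false r else pvRecGo m s r
      else if c = '-' ∨ c = ' ' then
        pvRecGo 1 true r
      else if m = 1 then
        PySem.Chars.upperChar c :: pvRecGo 2 true r
      else
        PySem.Chars.lowerChar c :: pvRecGo m true r

def pvTok (p : List Char) : List (List Char) := pvSplit '-' (p.map pvRep)

-- A's token list in the "no part open" state and the "current part open" state
def pvUflat (cs : List Char) : List (List Char) :=
  ((pvSplit '/' cs).filter (fun p => p != [])).flatMap pvTok
def pvTflat (cs : List Char) : List (List Char) :=
  pvTok ((pvSplit '/' cs).headD []) ++ (((pvSplit '/' cs).tail).filter (fun p => p != [])).flatMap pvTok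

def pvRender (ts : List (List Char)) : List Char :=
  PySem.Chars.lower (ts.headD []) ++ ((ts.drop 1).map pvCap).flatten
def pvCaps (ts : List (List Char)) : List Char := (ts.map pvCap).flatten

theorem pvSplit_ne_nil (d : Char) (l : List Char) : pvSplit d l ≠ [] := by
  cases l with
  | nil => simp [pvSplit]
  | cons c r => by_cases h : c = d <;> simp [pvSplit, h]

theorem pvTok_ne_nil (p : List Char) : pvTok p ≠ [] := pvSplit_ne_nil _ _

-- PySem.Chars.splitOn with a one-char separator is pvSplit
theorem pv_go_eq (d : Char) (l : List Char) : ∀ (fuel : Nat) (cur : List Char) (acc : List (List Char)),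
    l.length ≤ fuel →
    PySem.Chars.splitOn.go [d] fuel l cur acc =
      acc.reverse ++ (cur.reverse ++ (pvSplit d l).headD []) :: (pvSplit d l).tail := by
  induction l with
  | nil =>
    intro fuel cur acc _
    cases fuel <;> simp [PySem.Chars.splitOn.go, pvSplit]
  | cons c r ih =>
    intro fuel cur acc hf
    cases fuel with
    | zero => simp at hf
    | succ n =>
      simp only [List.length_cons, Nat.add_one_le_iff, Nat.lt_succ_iff] at hf
      by_cases h : c = d
      · subst h
        rw [show PySem.Chars.splitOn.go [c] (n + 1) (c :: r) cur acc =
              PySem.Chars.splitOn.go [c] n r [] (cur.reverse :: acc) from by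
            simp [PySem.Chars.splitOn.go, List.isPrefixOf]]
        rw [ih n [] (cur.reverse :: acc) hf]
        obtain ⟨h0, t0, hst⟩ := List.exists_cons_of_ne_nil (pvSplit_ne_nil c r)
        simp [pvSplit, hst]
      · rw [show PySem.Chars.splitOn.go [d] (n + 1) (c :: r) cur acc =
              PySem.Chars.splitOn.go [d] n r (c :: cur) acc from by
            simp [PySem.Chars.splitOn.go, List.isPrefixOf, Ne.symm h]]
        rw [ih n (c :: cur) acc hf]
        simp [pvSplit, h]

theorem pv_splitOn_eq (s : List Char) (d : Char) : PySem.Chars.splitOn s [d] = pvSplit d s := by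
  unfold PySem.Chars.splitOn
  rw [pv_go_eq d s (s.length + 1) [] [] (by omega)]
  obtain ⟨h, t, hst⟩ := List.exists_cons_of_ne_nil (pvSplit_ne_nil d s)
  simp [hst]

-- replace with one-char old/new is a map
theorem pv_replace_go_eq (l : List Char) : ∀ (fuel : Nat) (acc : List Char), l.length ≤ fuel →
    PySem.Chars.replace.go [' '] ['-'] fuel l acc = acc.reverse ++ l.map pvRep := by
  induction l with
  | nil => intro fuel acc _; cases fuel <;> simp [PySem.Chars.replace.go]
  | cons c r ih =>
    intro fuel acc hf
    cases fuel with
    | zero => simp at hf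
    | succ n =>
      simp only [List.length_cons, Nat.add_one_le_iff, Nat.lt_succ_iff] at hf
      by_cases h : c = ' '
      · subst h
        rw [show PySem.Chars.replace.go [' '] ['-'] (n + 1) (' ' :: r) acc =
              PySem.Chars.replace.go [' '] ['-'] n r ('-' :: acc) from by
            simp [PySem.Chars.replace.go, List.isPrefixOf]]
        rw [ih n _ hf]
        simp [pvRep]
      · rw [show PySem.Chars.replace.go [' '] ['-'] (n + 1) (c :: r) acc =
              PySem.Chars.replace.go [' '] ['-'] n r (c :: acc) from by
            simp [PySem.Chars.replace.go, List.isPrefixOf, Ne.symm h]]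
        rw [ih n _ hf]
        simp [pvRep, h]

theorem pv_replace_eq (p : List Char) : PySem.Chars.replace p [' '] ['-'] = p.map pvRep := by
  unfold PySem.Chars.replace
  simp only [List.isEmpty_cons, Bool.false_eq_true, if_false]
  exact pv_replace_go_eq p p.length [] le_rfl

theorem pvTok_eq (p : List Char) :
    PySem.Chars.splitOn (PySem.Chars.replace p [' '] ['-']) ['-'] = pvTok p := by
  rw [pv_replace_eq, pv_splitOn_eq]; rfl

-- cons facts about pvTflat / pvUflat
theorem pvTflat_nil : pvTflat [] = [[]] := by decide

theorem pvTflat_slash (cs : List Char) : pvTflat ('/' :: cs) = [] :: pvUflat cs := by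
  simp [pvTflat, pvUflat, pvSplit, pvTok]

theorem pvTflat_sep (c : Char) (cs : List Char) (hs : c = '-' ∨ c = ' ') :
    pvTflat (c :: cs) = [] :: pvTflat cs := by
  have hc : c ≠ '/' := by rcases hs with h | h <;> simp [h]
  have hr : pvRep c = '-' := by rcases hs with h | h <;> simp [pvRep, h]
  obtain ⟨h, t, hst⟩ := List.exists_cons_of_ne_nil (pvSplit_ne_nil '/' cs)
  simp [pvTflat, pvSplit, hc, hst, pvTok, hr]

theorem pvTflat_letter (c : Char) (cs : List Char) (h1 : c ≠ '/') (h2 : c ≠ '-') (h3 : c ≠ ' ') :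
    pvTflat (c :: cs) = (c :: (pvTflat cs).headD []) :: (pvTflat cs).tail := by
  have hr : pvRep c = c := by simp [pvRep, h3]
  obtain ⟨h, t, hst⟩ := List.exists_cons_of_ne_nil (pvSplit_ne_nil '/' cs)
  obtain ⟨h', t', hst'⟩ := List.exists_cons_of_ne_nil (pvSplit_ne_nil '-' (h.map pvRep))
  have htk : pvTok h = h' :: t' := hst'
  have htkc : pvTok (c :: h) = (c :: h') :: t' := by
    unfold pvTok
    simp only [List.map_cons, hr, pvSplit, if_neg h2, hst', List.headD_cons, List.tail_cons]
  unfold pvTflat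
  simp only [pvSplit, if_neg h1, hst, List.headD_cons, List.tail_cons, htkc, htk]
  simp

theorem pvUflat_nil : pvUflat [] = [] := by decide

theorem pvUflat_slash (cs : List Char) : pvUflat ('/' :: cs) = pvUflat cs := by
  simp [pvUflat, pvSplit]

theorem pvUflat_other (c : Char) (cs : List Char) (h1 : c ≠ '/') :
    pvUflat (c :: cs) = pvTflat (c :: cs) := by
  obtain ⟨h, t, hst⟩ := List.exists_cons_of_ne_nil (pvSplit_ne_nil '/' cs)
  simp [pvUflat, pvTflat, pvSplit, h1, hst]

theorem pvTflat_ne_nil (cs : List Char) : pvTflat cs ≠ [] := by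
  obtain ⟨h', t', hst'⟩ := List.exists_cons_of_ne_nil (pvTok_ne_nil ((pvSplit '/' cs).headD []))
  unfold pvTflat
  rw [hst']
  simp

-- render/caps cons facts
theorem pvRender_nil_cons (ts : List (List Char)) : pvRender ([] :: ts) = pvCaps ts := by
  simp [pvRender, pvCaps, PySem.Chars.lower]

theorem pvCaps_nil_cons (ts : List (List Char)) : pvCaps ([] :: ts) = pvCaps ts := by
  simp [pvCaps, pvCap]

-- the master simulation: the machine from each reachable state computes A's rendering
theorem pv_master (cs : List Char) :
    ((∀ m, m ≠ 1 → pvRecGo m false cs = pvRender (pvUflat cs)) ∧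
     (∀ m, m ≠ 1 → pvRecGo m true cs = pvRender (pvTflat cs)) ∧
     pvRecGo 1 false cs = pvCaps (pvUflat cs) ∧
     pvRecGo 1 true cs = pvCaps (pvTflat cs)) := by
  induction cs with
  | nil =>
    refine ⟨?_, ?_, ?_, ?_⟩ <;> simp [pvRecGo, pvUflat_nil, pvTflat_nil, pvRender, pvCaps, pvCap, PySem.Chars.lower]
  | cons c r ih =>
    obtain ⟨ihff, ihft, ihcf, ihct⟩ := ih
    by_cases hsl : c = '/'
    · subst hsl
      refine ⟨?_, ?_, ?_, ?_⟩
      · intro m hm; simp only [pvRecGo, Bool.false_eq_true, if_false, pvUflat_slash]; exact ihff m hm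
      · intro m hm; simp only [pvRecGo, pvTflat_slash, pvRender_nil_cons]; exact ihcf
      · simp only [pvRecGo, Bool.false_eq_true, if_false, pvUflat_slash]; exact ihcf
      · simp only [pvRecGo, pvTflat_slash, pvCaps_nil_cons]; exact ihcf
    · by_cases hsep : c = '-' ∨ c = ' '
      · have hU : pvUflat (c :: r) = [] :: pvTflat r := by
          rw [pvUflat_other c r hsl, pvTflat_sep c r hsep]
        have hT : pvTflat (c :: r) = [] :: pvTflat r := pvTflat_sep c r hsep
        refine ⟨?_, ?_, ?_, ?_⟩
        · intro m hm; simp only [pvRecGo, if_neg hsl, if_pos hsep, hU, pvRender_nil_cons]; exact ihct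
        · intro m hm; simp only [pvRecGo, if_neg hsl, if_pos hsep, hT, pvRender_nil_cons]; exact ihct
        · simp only [pvRecGo, if_neg hsl, if_pos hsep, hU, pvCaps_nil_cons]; exact ihct
        · simp only [pvRecGo, if_neg hsl, if_pos hsep, hT, pvCaps_nil_cons]; exact ihct
      · obtain ⟨hd, hs⟩ := not_or.mp hsep
        have hT : pvTflat (c :: r) = (c :: (pvTflat r).headD []) :: (pvTflat r).tail :=
          pvTflat_letter c r hsl hd hs
        have hU : pvUflat (c :: r) = (c :: (pvTflat r).headD []) :: (pvTflat r).tail := by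
          rw [pvUflat_other c r hsl, hT]
        obtain ⟨h0, t0, ht0⟩ := List.exists_cons_of_ne_nil (pvTflat_ne_nil r)
        have hlow : ∀ m, m ≠ 1 →
            pvRecGo m false (c :: r) = PySem.Chars.lowerChar c :: pvRender (pvTflat r) ∧
            pvRecGo m true (c :: r) = PySem.Chars.lowerChar c :: pvRender (pvTflat r) := by
          intro m hm
          constructor <;>
            · simp only [pvRecGo, if_neg hsl]
              rw [if_neg (show ¬(c = '-' ∨ c = ' ') by simp [hd, hs]), if_neg hm, ihft m hm]
        have hrend : pvRender ((c :: (pvTflat r).headD []) :: (pvTflat r).tail) =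
            PySem.Chars.lowerChar c :: pvRender (pvTflat r) := by
          rw [ht0]; simp [pvRender, PySem.Chars.lower]
        have hcaps : pvCaps ((c :: (pvTflat r).headD []) :: (pvTflat r).tail) =
            PySem.Chars.upperChar c :: pvRender (pvTflat r) := by
          rw [ht0]; simp [pvCaps, pvRender, pvCap]
        refine ⟨?_, ?_, ?_, ?_⟩
        · intro m hm; rw [hU, hrend]; exact (hlow m hm).1
        · intro m hm; rw [hT, hrend]; exact (hlow m hm).2
        · rw [hU, hcaps]
          simp only [pvRecGo, if_neg hsl]
          rw [if_neg (show ¬(c = '-' ∨ c = ' ') by simp [hd, hs])]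
          simp [ihft 2 (by omega)]
        · rw [hT, hcaps]
          simp only [pvRecGo, if_neg hsl]
          rw [if_neg (show ¬(c = '-' ∨ c = ' ') by simp [hd, hs])]
          simp [ihft 2 (by omega)]

-- the foldl of B's port equals the structural machine
theorem pv_foldl_eq (cs : List Char) : ∀ (out : List Char) (m : Nat) (s : Bool),
    (cs.foldl pvB_step (out, m, s)).1 = out ++ pvRecGo m s cs := by
  induction cs with
  | nil => intro out m s; simp [pvRecGo]
  | cons c r ih =>
    intro out m s
    by_cases h1 : c = '/'
    · cases s <;> simp [pvB_step, h1, pvRecGo, ih]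
    · by_cases h2 : c = '-' ∨ c = ' '
      · simp [pvB_step, h1, h2, pvRecGo, ih]
      · by_cases h3 : m = 1 <;> simp [pvB_step, h1, h2, pvRecGo, ih, h3]

-- A-side helpers
theorem pv_foldl_cap (l : List (List Char)) (a : List Char) :
    l.foldl (fun r sp => r ++ pvCap sp) a = a ++ (l.map pvCap).flatten := by
  induction l generalizing a with
  | nil => simp
  | cons h t ih => simp [ih, List.append_assoc]

theorem pv_loop_pos (ps : List (List Char)) (i : Nat) (acc : List (List Char)) (hi : i ≠ 0) :
    pvA_loop ps i acc = acc ++ ps.flatMap (fun p => (pvTok p).map pvCap) := by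
  induction ps generalizing i acc with
  | nil => simp [pvA_loop]
  | cons p ps ih =>
    simp only [pvA_loop, if_neg hi]
    rw [ih (i + 1) _ (by omega), pvTok_eq]
    simp [List.append_assoc]

theorem pv_intercalate_nil (l : List (List Char)) : List.intercalate ([] : List Char) l = l.flatten := by
  induction l with
  | nil => simp [List.intercalate]
  | cons h t ih => cases t <;> simp_all [List.intercalate, List.intersperse]

-- A rendered: on the non-overlay branch A produces pvRender (pvUflat cs)
theorem pv_A_render (path : String) (h : ¬ path == "overlay-modal") :
    semantic_path_to_field_name path = String.ofList (pvRender (pvUflat path.toList)) := by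
  unfold semantic_path_to_field_name
  simp only [h, Bool.false_eq_true, if_false]
  rw [pv_splitOn_eq]
  set parts := (pvSplit '/' path.toList).filter (fun p => p != []) with hparts
  cases hp : parts with
  | nil =>
    simp only [if_true]
    have : pvUflat path.toList = [] := by
      unfold pvUflat; rw [← hparts, hp]; rfl
    simp [this, pvRender, PySem.Chars.lower]
  | cons p0 ps =>
    simp only [reduceCtorEq, if_false]
    congr 1
    have hU : pvUflat path.toList = pvTok p0 ++ ps.flatMap pvTok := by
      unfold pvUflat; rw [← hparts, hp]; simp
    obtain ⟨h0, t0, hsub⟩ := List.exists_cons_of_ne_nil (pvTok_ne_nil p0)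
    simp only [pvA_loop, if_true]
    rw [pv_loop_pos _ 1 _ (by omega), pvTok_eq, hsub]
    simp only [List.headD_cons, List.drop_one, List.tail_cons, List.nil_append]
    rw [pv_foldl_cap]
    simp only [PySem.Chars.join, pv_intercalate_nil]
    rw [hU, hsub]
    simp [pvRender, List.map_flatMap]

-- ===== VERDICT (by name: the statement is the Claim_ definition above) =====
theorem semantic_path_to_field_name_spec : Claim_equal_semantic_path_to_field_name := by
  intro path _
  unfold Spec_semantic_path_to_field_name semantic_path_to_field_name_alt
  by_cases h : path == "overlay-modal"
  · simp only [h, if_true]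
    unfold semantic_path_to_field_name
    simp [h]
  · simp only [h, Bool.false_eq_true, if_false]
    rw [pv_A_render path (by simp [h]), pv_foldl_eq, (pv_master path.toList).1 0 (by omega)]
    rfl
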